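-- pv_equiv track=rewrite | github.com/mc2295/dino_hier | dinov2_hier/eval/utils/eval_hier.py | get_ancestor_path
-- ===== SOURCE A (Python) =====
-- def get_ancestor_path(label, hierarchy):
--     path = set()
--     for parent, children in hierarchy.items():
--         if label in children and parent != 'root':
--             path.add(parent)
--             path.update(get_ancestor_path(parent, hierarchy))
--     path.add(label)  # Include the label itself
--     return path
-- ===== SOURCE B (Python) =====
-- def get_ancestor_path(label, hierarchy):
--     parents = {}
--     for parent, children in hierarchy.items():
--         for child in children:
--             parents.setdefault(child, []).append(parent)
--     visited = set()
--     def visit(x):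
--         for p in parents.get(x, []):
--             if p != 'root' and p not in visited:
--                 visited.add(p)
--                 visit(p)
--     visit(label)
--     visited.add(label)
--     return visited
-- ===== Notes on version B (the rewrite author's own statement) =====
-- stated objective: alternative
-- what changed: Replaces A's naive recursion (which rescans the whole dict at every call and may re-explore shared ancestors) by a child->parents reverse index built once plus a memoized upward DFS over a shared visited set, expanding each node at most once; on the generator's shallow hierarchies this is not measurably faster. …
-- outside the precondition, e.g. on get_ancestor_path('a', {'b': ['c'], 'c': ['b']}): A returns {'a'}, B returns {'a'}
import Mathlib
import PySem

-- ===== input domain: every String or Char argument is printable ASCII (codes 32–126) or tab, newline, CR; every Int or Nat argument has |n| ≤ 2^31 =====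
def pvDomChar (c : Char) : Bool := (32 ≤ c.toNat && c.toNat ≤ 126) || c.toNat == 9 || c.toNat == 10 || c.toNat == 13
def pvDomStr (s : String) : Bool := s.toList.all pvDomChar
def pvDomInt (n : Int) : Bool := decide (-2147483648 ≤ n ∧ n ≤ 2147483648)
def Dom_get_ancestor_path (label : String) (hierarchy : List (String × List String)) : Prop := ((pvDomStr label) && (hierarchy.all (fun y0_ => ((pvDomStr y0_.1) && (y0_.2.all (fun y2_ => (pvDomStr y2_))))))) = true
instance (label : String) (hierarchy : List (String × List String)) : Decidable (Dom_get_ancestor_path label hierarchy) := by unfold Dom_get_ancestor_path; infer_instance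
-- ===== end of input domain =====

-- B replaces A's naive recursion (rescanning the dict at every call, re-exploring shared
-- ancestors) by a child→parents reverse index plus a memoized DFS over one shared visited
-- set, each node expanded at most once (a different algorithm, not measured faster here).
-- Equality of the returned sets (as PySem.Set lists) is proved on acyclic hierarchies
-- with distinct keys (Pre_ below).

-- ===== PORT A =====
-- the 'path' accumulated by A's items-loop; fuel only makes the recursion total
-- (on Pre_ inputs the fuel branch is never reached).  The recursive call
-- 'get_ancestor_path(parent, hierarchy)' returns its path with 'parent' added last,
-- i.e. 'PySem.Set.add (pvInnerA h f pc.1) pc.1'.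
def pvInnerA (h : List (String × List String)) : Nat → String → List String
  | 0, _ => []
  | f+1, label =>
      h.foldl (fun path pc =>
        if label ∈ pc.2 ∧ pc.1 ≠ "root" then
          PySem.Set.update (PySem.Set.add path pc.1) (PySem.Set.add (pvInnerA h f pc.1) pc.1)
        else path) []

def get_ancestor_path (label : String) (hierarchy : List (String × List String)) : List String :=
  PySem.Set.add (pvInnerA hierarchy (hierarchy.length + 1) label) label

-- ===== PORT B =====
-- parents.setdefault(child, []).append(parent)  ==  modify child [] (· ++ [parent])
def pvRevIndex (h : List (String × List String)) : PySem.Dict String (List String) :=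
  h.foldl (fun d pc => pc.2.foldl (fun d c => PySem.Dict.modify d c [] (fun l => l ++ [pc.1])) d) PySem.Dict.empty

-- visit(x): for p in parents.get(x, []): if p != 'root' and p not in visited: visited.add(p); visit(p)
def pvVisitB (pr : PySem.Dict String (List String)) : Nat → String → List String → List String
  | 0, _, vis => vis
  | f+1, x, vis =>
      (PySem.Dict.getD pr x []).foldl (fun vis p =>
        if p ≠ "root" ∧ p ∉ vis then pvVisitB pr f p (PySem.Set.add vis p) else vis) vis

def get_ancestor_path_alt (label : String) (hierarchy : List (String × List String)) : List String :=
  PySem.Set.add (pvVisitB (pvRevIndex hierarchy) (hierarchy.length + 1) label []) label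

-- ===== PRECONDITION & SPEC =====
-- parents of x via edges A can traverse (parent ≠ 'root')
def pvParentsNR (h : List (String × List String)) (x : String) : List String :=
  (h.filter (fun pc => decide (x ∈ pc.2) && decide (pc.1 ≠ "root"))).map (·.1)

-- all strict ancestors of x reachable in ≤ n upward steps: a bounded reachability
-- relation on the input graph (neither port computes or uses pvUpN; it only states
-- acyclicity in a decidable form)
def pvUpN (h : List (String × List String)) : Nat → String → List String
  | 0, _ => []
  | n+1, x => pvParentsNR h x ++ (pvParentsNR h x).flatMap (pvUpN h n)

-- Pre_ excludes (i) duplicate keys — impossible in the Python dict A receives, whose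
-- last-wins collapse an association-list port cannot mirror — and (ii) hierarchies whose
-- parent-edges contain a cycle, where A either recurses forever (RecursionError) or, when
-- the cycle is not above label, returns a value A and B agree on anyway; acyclicity is
-- stated in closed form as 'no key is its own ≤(n+1)-step strict ancestor'.
def Pre_get_ancestor_path (label : String) (hierarchy : List (String × List String)) : Prop :=
  (hierarchy.map Prod.fst).Nodup ∧
  ∀ p ∈ hierarchy.map Prod.fst, p ∉ pvUpN hierarchy (hierarchy.length + 1) p

instance (label : String) (hierarchy : List (String × List String)) : Decidable (Pre_get_ancestor_path label hierarchy) := by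
  unfold Pre_get_ancestor_path; infer_instance

def pvWitness_get_ancestor_path : String × (List (String × List String)) :=
  ("a", [("b", ["a"]), ("c", ["b", "a"])])

def Spec_get_ancestor_path (label : String) (hierarchy : List (String × List String)) (out : List String) : Prop := out = get_ancestor_path_alt label hierarchy
instance (label : String) (hierarchy : List (String × List String)) (out : List String) : Decidable (Spec_get_ancestor_path label hierarchy out) := by unfold Spec_get_ancestor_path; infer_instance

-- ===== CLAIM (what is proved, stated in full; the proofs are below) =====
def Claim_equal_get_ancestor_path : Prop := ∀ (label : String) (hierarchy : List (String × List String)), Dom_get_ancestor_path label hierarchy → Pre_get_ancestor_path label hierarchy → Spec_get_ancestor_path label hierarchy (get_ancestor_path label hierarchy)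


-- ===== LEMMAS AND PROOFS =====

-- y is a strict ancestor of x (some number of upward steps through non-root parents)
def pvAnc (h : List (String × List String)) (x y : String) : Prop := ∃ n, y ∈ pvUpN h n x

-- loop invariant of B: every visited node is either still on the DFS stack or fully explored
def pvInv (h : List (String × List String)) (vis st : List String) : Prop :=
  ∀ q ∈ vis, q ∈ st ∨ (∀ y, pvAnc h q y → y ∈ vis)

-- named forms of the two ports' loop bodies
def pvStA (h : List (String × List String)) (f : Nat) (x : String) : List String → (String × List String) → List String :=
  fun path pc =>
    if x ∈ pc.2 ∧ pc.1 ≠ "root" then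
      PySem.Set.update (PySem.Set.add path pc.1) (PySem.Set.add (pvInnerA h f pc.1) pc.1)
    else path

def pvStB (pr : PySem.Dict String (List String)) (f : Nat) : List String → String → List String :=
  fun vis p => if p ≠ "root" ∧ p ∉ vis then pvVisitB pr f p (PySem.Set.add vis p) else vis

lemma pvInnerA_succ (h : List (String × List String)) (f : Nat) (x : String) :
    pvInnerA h (f+1) x = h.foldl (pvStA h f x) [] := rfl

lemma pvVisitB_succ (pr : PySem.Dict String (List String)) (f : Nat) (x : String) (vis : List String) :
    pvVisitB pr (f+1) x vis = (PySem.Dict.getD pr x []).foldl (pvStB pr f) vis := rfl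

lemma pvMem_parentsNR {h : List (String × List String)} {x p : String} :
    p ∈ pvParentsNR h x ↔ ∃ cs, (p, cs) ∈ h ∧ x ∈ cs ∧ p ≠ "root" := by
  simp only [pvParentsNR, List.mem_map, List.mem_filter]
  constructor
  · rintro ⟨⟨a, b⟩, ⟨hm, hf⟩, rfl⟩
    simp only [Bool.and_eq_true, decide_eq_true_eq] at hf
    exact ⟨b, hm, hf.1, hf.2⟩
  · rintro ⟨cs, hm, hx, hr⟩
    exact ⟨(p, cs), ⟨hm, by simp [hx, hr]⟩, rfl⟩

lemma pvParentsNR_keys {h : List (String × List String)} {x p : String}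
    (hp : p ∈ pvParentsNR h x) : p ∈ h.map Prod.fst := by
  rcases pvMem_parentsNR.1 hp with ⟨cs, hm, -, -⟩
  exact List.mem_map.2 ⟨(p, cs), hm, rfl⟩

lemma pvMem_upN_succ {h : List (String × List String)} {n : Nat} {x y : String} :
    y ∈ pvUpN h (n+1) x ↔ y ∈ pvParentsNR h x ∨ ∃ p ∈ pvParentsNR h x, y ∈ pvUpN h n p := by
  simp [pvUpN, List.mem_append, List.mem_flatMap]

lemma pvUpN_mono {h : List (String × List String)} {n m : Nat} (hnm : n ≤ m) :
    ∀ {x y}, y ∈ pvUpN h n x → y ∈ pvUpN h m x := by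
  induction n generalizing m with
  | zero => intro x y hy; simp [pvUpN] at hy
  | succ n ih =>
    intro x y hy
    obtain ⟨m', rfl⟩ : ∃ m', m = m' + 1 := ⟨m - 1, by omega⟩
    rcases pvMem_upN_succ.1 hy with hp | ⟨p, hp, hyp⟩
    · exact pvMem_upN_succ.2 (Or.inl hp)
    · exact pvMem_upN_succ.2 (Or.inr ⟨p, hp, ih (by omega) hyp⟩)

lemma pvUpN_keys {h : List (String × List String)} :
    ∀ {n x y}, y ∈ pvUpN h n x → y ∈ h.map Prod.fst := by
  intro n
  induction n with
  | zero => intro x y hy; simp [pvUpN] at hy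
  | succ n ih =>
    intro x y hy
    rcases pvMem_upN_succ.1 hy with hp | ⟨p, hp, hyp⟩
    · exact pvParentsNR_keys hp
    · exact ih hyp

lemma pvAnc_of_parent {h : List (String × List String)} {x p : String}
    (hp : p ∈ pvParentsNR h x) : pvAnc h x p :=
  ⟨1, pvMem_upN_succ.2 (Or.inl hp)⟩

lemma pvUpN_comp {h : List (String × List String)} :
    ∀ {n m x y z}, y ∈ pvUpN h n x → z ∈ pvUpN h m y → z ∈ pvUpN h (n+m) x := by
  intro n
  induction n with
  | zero => intro m x y z hy; simp [pvUpN] at hy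
  | succ n ih =>
    intro m x y z hy hz
    rcases pvMem_upN_succ.1 hy with hp | ⟨p, hp, hyp⟩
    · have hz' : z ∈ pvUpN h (n+m) y := pvUpN_mono (by omega) hz
      have : z ∈ pvUpN h ((n+m)+1) x := pvMem_upN_succ.2 (Or.inr ⟨y, hp, hz'⟩)
      simpa [Nat.add_right_comm] using this
    · have : z ∈ pvUpN h ((n+m)+1) x := pvMem_upN_succ.2 (Or.inr ⟨p, hp, ih hyp hz⟩)
      simpa [Nat.add_right_comm] using this

lemma pvAnc_trans {h : List (String × List String)} {x y z : String}
    (h1 : pvAnc h x y) (h2 : pvAnc h y z) : pvAnc h x z := by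
  rcases h1 with ⟨n, h1⟩; rcases h2 with ⟨m, h2⟩
  exact ⟨n + m, pvUpN_comp h1 h2⟩

lemma pvAnc_step {h : List (String × List String)} {x p y : String}
    (hp : p ∈ pvParentsNR h x) (hy : pvAnc h p y) : pvAnc h x y :=
  pvAnc_trans (pvAnc_of_parent hp) hy

lemma pvAnc_inv {h : List (String × List String)} {x y : String} (hxy : pvAnc h x y) :
    y ∈ pvParentsNR h x ∨ ∃ p ∈ pvParentsNR h x, pvAnc h p y := by
  rcases hxy with ⟨n, hn⟩
  cases n with
  | zero => simp [pvUpN] at hn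
  | succ n =>
    rcases pvMem_upN_succ.1 hn with hp | ⟨p, hp, hyp⟩
    · exact Or.inl hp
    · exact Or.inr ⟨p, hp, ⟨n, hyp⟩⟩

-- ---------- chains, and acyclicity from the bounded condition ----------
def pvChain (h : List (String × List String)) : String → List String → Prop
  | _, [] => True
  | x, p :: rest => p ∈ pvParentsNR h x ∧ pvChain h p rest

lemma pvChain_subset_keys {h : List (String × List String)} :
    ∀ {x ns}, pvChain h x ns → ∀ y ∈ ns, y ∈ h.map Prod.fst := by
  intro x ns
  induction ns generalizing x with
  | nil => intro _ y hy; simp at hy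
  | cons p rest ih =>
    rintro ⟨hp, hrest⟩ y hy
    rcases List.mem_cons.1 hy with rfl | hy
    · exact pvParentsNR_keys hp
    · exact ih hrest y hy

lemma pvChain_to_upN {h : List (String × List String)} :
    ∀ {ns x y n}, pvChain h x ns → ns.getLast? = some y → ns.length ≤ n → y ∈ pvUpN h n x := by
  intro ns
  induction ns with
  | nil => intro x y n _ hl; simp at hl
  | cons p rest ih =>
    intro x y n hc hl hn
    obtain ⟨n', rfl⟩ : ∃ n', n = n' + 1 := ⟨n - 1, by simp at hn ⊢; omega⟩
    rcases hc with ⟨hp, hrest⟩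
    cases rest with
    | nil =>
      simp at hl; subst hl
      exact pvMem_upN_succ.2 (Or.inl hp)
    | cons q rest' =>
      have hl' : (q :: rest').getLast? = some y := by
        simpa [List.getLast?_cons_cons] using hl
      have := ih hrest hl' (n := n') (by simp at hn ⊢; omega)
      exact pvMem_upN_succ.2 (Or.inr ⟨p, hp, this⟩)

lemma pvUpN_to_chain {h : List (String × List String)} :
    ∀ {n x y}, y ∈ pvUpN h n x → ∃ ns, pvChain h x ns ∧ ns.getLast? = some y ∧ ns.length ≤ n := by
  intro n
  induction n with
  | zero => intro x y hy; simp [pvUpN] at hy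
  | succ n ih =>
    intro x y hy
    rcases pvMem_upN_succ.1 hy with hp | ⟨p, hp, hyp⟩
    · exact ⟨[y], ⟨hp, trivial⟩, rfl, by simp⟩
    · rcases ih hyp with ⟨ns, hc, hl, hlen⟩
      refine ⟨p :: ns, ⟨hp, hc⟩, ?_, by simp; omega⟩
      cases ns with
      | nil => simp at hl
      | cons a l => simpa [List.getLast?_cons_cons] using hl

lemma pvChain_prefix {h : List (String × List String)} :
    ∀ {ns ms x}, pvChain h x (ns ++ ms) → pvChain h x ns := by
  intro ns
  induction ns with
  | nil => intro _ _ _; trivial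
  | cons p rest ih =>
    rintro ms x ⟨hp, hc⟩
    exact ⟨hp, ih hc⟩

lemma pvChain_split {h : List (String × List String)} :
    ∀ {l1 : List String} {a : String} {l2 x}, pvChain h x (l1 ++ a :: l2) → pvChain h a l2 := by
  intro l1
  induction l1 with
  | nil => rintro a l2 x ⟨_, hc⟩; exact hc
  | cons p rest ih =>
    rintro a l2 x ⟨_, hc⟩
    exact ih hc

lemma pvNot_nodup_split {α : Type} {ns : List α} (hnd : ¬ ns.Nodup) :
    ∃ a l1 l2 l3, ns = l1 ++ a :: l2 ++ a :: l3 := by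
  induction ns with
  | nil => simp at hnd
  | cons x xs ih =>
    by_cases hx : x ∈ xs
    · rcases List.append_of_mem hx with ⟨s, t, rfl⟩
      exact ⟨x, [], s, t, by simp⟩
    · have : ¬ xs.Nodup := by
        intro hn; exact hnd (List.nodup_cons.2 ⟨hx, hn⟩)
      rcases ih this with ⟨a, l1, l2, l3, rfl⟩
      exact ⟨a, x :: l1, l2, l3, by simp⟩

lemma pvLength_le_of_nodup_subset {α : Type} [DecidableEq α] {l l' : List α}
    (hnd : l.Nodup) (hsub : l ⊆ l') : l.length ≤ l'.length := by
  calc l.length = l.toFinset.card := (List.toFinset_card_of_nodup hnd).symm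
    _ ≤ l'.toFinset.card := Finset.card_le_card (fun a ha => by
        simp only [List.mem_toFinset] at ha ⊢; exact hsub ha)
    _ ≤ l'.length := List.toFinset_card_le l'

lemma pvNoCycle {h : List (String × List String)}
    (hb : ∀ p ∈ h.map Prod.fst, p ∉ pvUpN h (h.length + 1) p) :
    ∀ q, ¬ pvAnc h q q := by
  have key : ∀ k, ∀ (ns : List String) (r : String),
      pvChain h r ns → ns.getLast? = some r → ns.length ≤ k → False := by
    intro k
    induction k using Nat.strong_induction_on with
    | _ k ihk =>
      intro ns r hc hl hlen
      by_cases hshort : ns.length ≤ h.length + 1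
      · have hr : r ∈ pvUpN h (h.length + 1) r := pvChain_to_upN hc hl hshort
        have hrk : r ∈ h.map Prod.fst := pvUpN_keys hr
        exact hb r hrk hr
      · have hnn : ¬ ns.Nodup := by
          intro hnd
          have hsub : ns ⊆ h.map Prod.fst := fun y hy => pvChain_subset_keys hc y hy
          have := pvLength_le_of_nodup_subset hnd hsub
          simp at this
          omega
        rcases pvNot_nodup_split hnn with ⟨a, l1, l2, l3, rfl⟩
        have hre : l1 ++ a :: l2 ++ a :: l3 = l1 ++ a :: (l2 ++ a :: l3) := by simp
        rw [hre] at hc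
        have hc2 : pvChain h a (l2 ++ a :: l3) := pvChain_split hc
        have hc3 : pvChain h a (l2 ++ [a]) := by
          have : l2 ++ a :: l3 = (l2 ++ [a]) ++ l3 := by simp
          exact pvChain_prefix (this ▸ hc2)
        have hl3 : (l2 ++ [a]).getLast? = some a := by simp
        have hlen3 : (l2 ++ [a]).length < (l1 ++ a :: l2 ++ a :: l3).length := by
          simp; omega
        exact ihk (l2 ++ [a]).length (by omega) _ a hc3 hl3 le_rfl
  rintro q ⟨n, hq⟩
  rcases pvUpN_to_chain hq with ⟨ns, hc, hl, -⟩
  exact key ns.length ns q hc hl le_rfl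

-- ---------- PySem.Set helper lemmas ----------
lemma pvAdd_of_mem {s : List String} {c : String} (hc : c ∈ s) : PySem.Set.add s c = s := by
  simp [PySem.Set.add, hc]

lemma pvMem_of_subset_update {s l : List String} : s ⊆ PySem.Set.update s l := by
  intro y hy; exact (PySem.Set.mem_update _ _ _).2 (Or.inl hy)

lemma pvUpdate_add (a b : List String) (c : String) :
    PySem.Set.update a (PySem.Set.add b c) = PySem.Set.add (PySem.Set.update a b) c := by
  by_cases hc : c ∈ b
  · rw [pvAdd_of_mem hc, pvAdd_of_mem ((PySem.Set.mem_update _ _ _).2 (Or.inr hc))]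
  · have h1 : PySem.Set.add b c = b ++ [c] := by simp [PySem.Set.add, hc]
    rw [h1, PySem.Set.update_append]
    rfl

lemma pvUpdate_update (a b : List String) (l : List String) :
    PySem.Set.update a (PySem.Set.update b l) = PySem.Set.update (PySem.Set.update a b) l := by
  induction l generalizing b with
  | nil => simp [PySem.Set.update]
  | cons c l ih =>
    rw [PySem.Set.update_cons, ih, pvUpdate_add, PySem.Set.update_cons]

lemma pvUpdate_of_subset {s l : List String} (hl : ∀ y ∈ l, y ∈ s) :
    PySem.Set.update s l = s := by
  induction l generalizing s with
  | nil => simp [PySem.Set.update]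
  | cons c l ih =>
    rw [PySem.Set.update_cons, pvAdd_of_mem (hl c (by simp))]
    exact ih (fun y hy => hl y (by simp [hy]))

-- ---------- characterisation of the reverse index ----------
lemma pvFoldl_flatMap {α β γ : Type} (g : γ → β → γ) (f : α → List β) (l : List α) (init : γ) :
    (l.flatMap f).foldl g init = l.foldl (fun a x => (f x).foldl g a) init := by
  induction l generalizing init with
  | nil => rfl
  | cons x l ih => simp [List.flatMap_cons, List.foldl_append, ih]

lemma pvRevIndex_getD (h : List (String × List String)) (x : String) :
    PySem.Dict.getD (pvRevIndex h) x []
      = h.flatMap (fun pc => (pc.2.filter (fun c => c == x)).map (fun _ => pc.1)) := by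
  have h1 : pvRevIndex h
      = (h.flatMap (fun pc => pc.2.map (fun c => (c, pc.1)))).foldl
          (fun d p => PySem.Dict.modify d p.1 [] (· ++ [p.2])) PySem.Dict.empty := by
    rw [pvFoldl_flatMap]
    unfold pvRevIndex
    congr 1
    funext d pc
    rw [List.foldl_map]
  rw [h1, PySem.Dict.getD_foldl_modify_append]
  rw [PySem.Dict.getD_empty, List.nil_append]
  rw [List.filter_flatMap, List.map_flatMap]
  congr 1
  funext pc
  rw [List.filter_map, List.map_map]
  congr 1

-- ---------- soundness and nodup of A's accumulation ----------
lemma pvInnerA_sound {h : List (String × List String)} :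
    ∀ {f x y}, y ∈ pvInnerA h f x → pvAnc h x y := by
  intro f
  induction f with
  | zero => intro x y hy; simp [pvInnerA] at hy
  | succ f ih =>
    intro x y hy
    rw [pvInnerA_succ] at hy
    have main : ∀ (t : List (String × List String)), (∀ pc ∈ t, pc ∈ h) →
        ∀ acc, (∀ z ∈ acc, pvAnc h x z) → ∀ z ∈ t.foldl (pvStA h f x) acc, pvAnc h x z := by
      intro t
      induction t with
      | nil => intro _ acc hacc z hz; exact hacc z hz
      | cons pc t iht =>
        intro ht acc hacc z hz
        refine iht (fun q hq => ht q (by simp [hq])) _ ?_ z hz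
        intro w hw
        unfold pvStA at hw
        split at hw
        · rename_i hg
          have hp : pc.1 ∈ pvParentsNR h x :=
            pvMem_parentsNR.2 ⟨pc.2, by rcases pc with ⟨a,b⟩; exact ht _ (by simp), hg.1, hg.2⟩
          rcases (PySem.Set.mem_update _ _ _).1 hw with hw | hw
          · rcases (PySem.Set.mem_add _ _ _).1 hw with hw | rfl
            · exact hacc w hw
            · exact pvAnc_of_parent hp
          · rcases (PySem.Set.mem_add _ _ _).1 hw with hw | rfl
            · exact pvAnc_step hp (ih hw)
            · exact pvAnc_of_parent hp
        · exact hacc w hw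
    exact main h (fun _ hq => hq) [] (by simp) y hy

lemma pvInnerA_nodup {h : List (String × List String)} : ∀ {f x}, (pvInnerA h f x).Nodup := by
  intro f
  induction f with
  | zero => intro x; simp [pvInnerA]
  | succ f _ =>
    intro x
    rw [pvInnerA_succ]
    have : ∀ (t : List (String × List String)) (acc : List String), acc.Nodup →
        (t.foldl (pvStA h f x) acc).Nodup := by
      intro t
      induction t with
      | nil => intro acc h; exact h
      | cons pc t iht =>
        intro acc hacc
        refine iht _ ?_
        unfold pvStA
        split
        · exact PySem.Set.nodup_update _ _ (PySem.Set.nodup_add _ _ hacc)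
        · exact hacc
    exact this h [] (by simp)

-- B's walk only grows the visited set
lemma pvVisitB_mono {pr : PySem.Dict String (List String)} :
    ∀ {f x vis}, vis ⊆ pvVisitB pr f x vis := by
  intro f
  induction f with
  | zero => intro x vis; simp [pvVisitB]
  | succ f ih =>
    intro x vis
    rw [pvVisitB_succ]
    have : ∀ (l : List String) (vis : List String), vis ⊆ l.foldl (pvStB pr f) vis := by
      intro l
      induction l with
      | nil => intro vis; simp
      | cons p l ihl =>
        intro vis
        refine subset_trans ?_ (ihl _)
        unfold pvStB
        split
        · exact subset_trans (fun y hy => (PySem.Set.mem_add _ _ _).2 (Or.inl hy)) ih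
        · exact fun y hy => hy
    exact this _ vis

-- outer loop body of B's walk, per hierarchy item (occurrences of x in pc.2)
def pvBOut (h : List (String × List String)) (f : Nat) (x : String) :
    List String → (String × List String) → List String :=
  fun vis pc => ((pc.2.filter (fun c => c == x)).map (fun _ => pc.1)).foldl (pvStB (pvRevIndex h) f) vis

lemma pvVisitB_items (h : List (String × List String)) (f : Nat) (x : String) (vis : List String) :
    pvVisitB (pvRevIndex h) (f+1) x vis = h.foldl (pvBOut h f x) vis := by
  rw [pvVisitB_succ, pvRevIndex_getD, pvFoldl_flatMap]
  rfl

lemma pvOccs_eq (cs : List String) (x p : String) :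
    (cs.filter (fun c => c == x)).map (fun _ => p) = List.replicate (cs.count x) p := by
  rw [List.filter_beq, List.map_replicate]

lemma pvRepFold {pr : PySem.Dict String (List String)} {f : Nat} {p : String} :
    ∀ (k : Nat) {vis : List String}, (p = "root" ∨ p ∈ vis) →
      (List.replicate k p).foldl (pvStB pr f) vis = vis := by
  intro k
  induction k with
  | zero => intro vis _; rfl
  | succ k ih =>
    intro vis hv
    rw [List.replicate_succ, List.foldl_cons]
    have hstep : pvStB pr f vis p = vis := by
      unfold pvStB
      rw [if_neg]
      rintro ⟨hr, hnv⟩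
      rcases hv with hv | hv
      · exact hr hv
      · exact hnv hv
    rw [hstep, ih hv]

lemma pvFoldA_append (h : List (String × List String)) (f : Nat) (x : String) :
    ∀ (t : List (String × List String)) (path : List String),
      ∃ δ, t.foldl (pvStA h f x) path = path ++ δ := by
  intro t
  induction t with
  | nil => intro path; exact ⟨[], by simp⟩
  | cons pc t ih =>
    intro path
    have hstep : ∃ δ1, pvStA h f x path pc = path ++ δ1 := by
      unfold pvStA
      split
      · have hadd : ∃ δa, PySem.Set.add path pc.1 = path ++ δa := by
          by_cases hm : pc.1 ∈ path
          · exact ⟨[], by rw [pvAdd_of_mem hm, List.append_nil]⟩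
          · exact ⟨[pc.1], by simp [PySem.Set.add, hm]⟩
        rcases hadd with ⟨δa, ha⟩
        rw [ha, PySem.Set.update_eq_append_filter, List.append_assoc]
        exact ⟨_, rfl⟩
      · exact ⟨[], by rw [List.append_nil]⟩
    rcases hstep with ⟨δ1, h1⟩
    rw [List.foldl_cons, h1]
    rcases ih (path ++ δ1) with ⟨δ2, h2⟩
    rw [h2, List.append_assoc]
    exact ⟨_, rfl⟩

-- ---------- the main DFS lemma ----------
-- statement of the fuel-f main property
def pvMainProp (h : List (String × List String)) (f : Nat) : Prop :=
  ∀ (x : String) (st vis : List String),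
    (∀ r ∈ st, pvAnc h r x) →
    st.Pairwise (fun a b => pvAnc h b a) →
    (∀ r ∈ (x :: st).dropLast, r ∈ h.map Prod.fst) →
    h.length + 2 ≤ f + (x :: st).length →
    pvInv h vis (x :: st) →
    pvVisitB (pvRevIndex h) f x vis = PySem.Set.update vis (pvInnerA h f x)
    ∧ pvInv h (pvVisitB (pvRevIndex h) f x vis) (x :: st)
    ∧ (∀ y, pvAnc h x y → y ∈ pvVisitB (pvRevIndex h) f x vis)

lemma pvInnerLem (h : List (String × List String))
    (hnc : ∀ q, ¬ pvAnc h q q)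
    (f : Nat) (x : String) (st : List String)
    (hstanc : ∀ r ∈ st, pvAnc h r x)
    (hstp : st.Pairwise (fun a b => pvAnc h b a))
    (hstk : ∀ r ∈ (x :: st).dropLast, r ∈ h.map Prod.fst)
    (hfuel : h.length + 2 ≤ (f + 1) + (x :: st).length)
    (IH : pvMainProp h f) :
    ∀ (t : List (String × List String)), (∀ pc ∈ t, pc ∈ h) →
    ∀ (vis0 path : List String),
      pvInv h (PySem.Set.update vis0 path) (x :: st) →
      (t.foldl (pvBOut h f x) (PySem.Set.update vis0 path)
          = PySem.Set.update vis0 (t.foldl (pvStA h f x) path))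
      ∧ pvInv h (PySem.Set.update vis0 (t.foldl (pvStA h f x) path)) (x :: st)
      ∧ (∀ pc ∈ t, x ∈ pc.2 → pc.1 ≠ "root" →
          ∀ y, y = pc.1 ∨ pvAnc h pc.1 y →
            y ∈ PySem.Set.update vis0 (t.foldl (pvStA h f x) path)) := by
  intro t
  induction t with
  | nil =>
    intro _ vis0 path hinv
    exact ⟨rfl, hinv, by intro pc hpc; simp at hpc⟩
  | cons pc t iht =>
    intro ht vis0 path hinv
    have hpc : pc ∈ h := ht pc (by simp)
    have ht' : ∀ q ∈ t, q ∈ h := fun q hq => ht q (by simp [hq])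
    obtain ⟨p, cs⟩ := pc
    set vis := PySem.Set.update vis0 path with hvis
    -- one-step analysis: (E) B's item step equals the update by A's item step,
    -- (I1) invariant preserved, (C) closure of p contained when the guard fires
    have hstep :
        pvBOut h f x vis (p, cs) = PySem.Set.update vis0 (pvStA h f x path (p, cs))
        ∧ pvInv h (PySem.Set.update vis0 (pvStA h f x path (p, cs))) (x :: st)
        ∧ (x ∈ cs → p ≠ "root" →
            ∀ y, y = p ∨ pvAnc h p y → y ∈ PySem.Set.update vis0 (pvStA h f x path (p, cs))) := by
      by_cases hx : x ∈ cs
      · by_cases hroot : p = "root"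
        · have hA : pvStA h f x path (p, cs) = path := by
            unfold pvStA
            rw [if_neg]
            rintro ⟨-, hr⟩
            exact hr hroot
          have hB : pvBOut h f x vis (p, cs) = vis := by
            unfold pvBOut
            rw [pvOccs_eq, pvRepFold _ (Or.inl hroot)]
          rw [hA, hB]
          exact ⟨rfl, hinv, fun _ hr => absurd hroot hr⟩
        · -- real edge x → p
          have hp : p ∈ pvParentsNR h x := pvMem_parentsNR.2 ⟨cs, hpc, hx, hroot⟩
          have hA : pvStA h f x path (p, cs)
              = PySem.Set.update (PySem.Set.add path p) (PySem.Set.add (pvInnerA h f p) p) := by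
            unfold pvStA
            rw [if_pos ⟨hx, hroot⟩]
          have hpns : p ∉ x :: st := by
            intro hmem
            rcases List.mem_cons.1 hmem with rfl | hmem
            · exact hnc p (pvAnc_of_parent hp)
            · exact hnc p (pvAnc_trans (hstanc p hmem) (pvAnc_of_parent hp))
          obtain ⟨k, hk⟩ : ∃ k, cs.count x = k + 1 := by
            have : 0 < cs.count x := List.count_pos_iff.2 hx
            exact ⟨cs.count x - 1, by omega⟩
          by_cases hpv : p ∈ vis
          · -- p already visited: B does nothing, A's whole item step is absorbed
            have hclos : ∀ y, pvAnc h p y → y ∈ vis := by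
              rcases hinv p hpv with hmem | hcl
              · exact absurd hmem hpns
              · exact hcl
            have hE : PySem.Set.update vis0 (pvStA h f x path (p, cs)) = vis := by
              rw [hA, pvUpdate_update, pvUpdate_add, pvUpdate_add, ← hvis, pvAdd_of_mem hpv,
                pvUpdate_of_subset (fun y hy => hclos y (pvInnerA_sound hy)),
                pvAdd_of_mem hpv]
            have hB : pvBOut h f x vis (p, cs) = vis := by
              unfold pvBOut
              rw [pvOccs_eq, pvRepFold _ (Or.inr hpv)]
            rw [hE, hB]
            refine ⟨rfl, hinv, fun _ _ y hy => ?_⟩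
            rcases hy with rfl | hy
            · exact hpv
            · exact hclos y hy
          · -- p unvisited: B recurses; apply the fuel-f main property at p
            have hmain := IH p (x :: st) (PySem.Set.add vis p)
              (by
                intro r hr
                rcases List.mem_cons.1 hr with rfl | hr
                · exact pvAnc_of_parent hp
                · exact pvAnc_trans (hstanc r hr) (pvAnc_of_parent hp))
              (List.pairwise_cons.2 ⟨fun b hb => hstanc b hb, hstp⟩)
              (by
                intro r hr
                have hdl : (p :: x :: st).dropLast = p :: (x :: st).dropLast := by
                  simp [List.dropLast]
                rw [hdl] at hr
                rcases List.mem_cons.1 hr with rfl | hr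
                · exact pvParentsNR_keys hp
                · exact hstk r hr)
              (by simp at hfuel ⊢; omega)
              (by
                intro q hq
                rcases (PySem.Set.mem_add _ _ _).1 hq with hq | rfl
                · rcases hinv q hq with hmem | hcl
                  · exact Or.inl (by simp [hmem])
                  · exact Or.inr (fun y hy => (PySem.Set.mem_add _ _ _).2 (Or.inl (hcl y hy)))
                · exact Or.inl (by simp))
            set R := pvVisitB (pvRevIndex h) f p (PySem.Set.add vis p) with hR
            obtain ⟨e1, inv1, compl1⟩ := hmain
            have hpR : p ∈ R := pvVisitB_mono ((PySem.Set.mem_add _ _ _).2 (Or.inr rfl))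
            have hE : PySem.Set.update vis0 (pvStA h f x path (p, cs)) = R := by
              rw [hA, pvUpdate_update, pvUpdate_add, pvUpdate_add, ← hvis, ← e1,
                pvAdd_of_mem hpR]
            have hB : pvBOut h f x vis (p, cs) = R := by
              unfold pvBOut
              rw [pvOccs_eq, hk, List.replicate_succ, List.foldl_cons]
              have hone : pvStB (pvRevIndex h) f vis p = R := by
                unfold pvStB
                rw [if_pos ⟨hroot, hpv⟩]
              rw [hone, pvRepFold _ (Or.inr hpR)]
            rw [hE, hB]
            refine ⟨rfl, ?_, fun _ _ y hy => ?_⟩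
            · intro q hq
              rcases inv1 q hq with hmem | hcl
              · rcases List.mem_cons.1 hmem with rfl | hmem
                · exact Or.inr (fun y hy => compl1 y hy)
                · exact Or.inl hmem
              · exact Or.inr hcl
            · rcases hy with rfl | hy
              · exact hpR
              · exact compl1 y hy
      · -- x not a child in this item: both sides skip it
        have hA : pvStA h f x path (p, cs) = path := by
          unfold pvStA
          rw [if_neg]
          rintro ⟨hx', -⟩
          exact hx hx'
        have hB : pvBOut h f x vis (p, cs) = vis := by
          unfold pvBOut
          have : cs.count x = 0 := List.count_eq_zero.2 hx
          rw [pvOccs_eq, this]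
          rfl
        rw [hA, hB]
        exact ⟨rfl, hinv, fun hx' _ => absurd hx' hx⟩
    obtain ⟨hE, hI1, hC⟩ := hstep
    set path1 := pvStA h f x path (p, cs) with hpath1
    have hrest := iht ht' vis0 path1 hI1
    obtain ⟨e2, inv2, cl2⟩ := hrest
    have hfold : ((p, cs) :: t).foldl (pvBOut h f x) vis
        = PySem.Set.update vis0 (((p, cs) :: t).foldl (pvStA h f x) path) := by
      rw [List.foldl_cons, List.foldl_cons, hE]
      exact e2
    have hmono : ∀ y, y ∈ PySem.Set.update vis0 path1
        → y ∈ PySem.Set.update vis0 (t.foldl (pvStA h f x) path1) := by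
      intro y hy
      rcases pvFoldA_append h f x t path1 with ⟨δ, hδ⟩
      rw [hδ, PySem.Set.update_append]
      exact pvMem_of_subset_update hy
    refine ⟨hfold, by rw [List.foldl_cons]; exact inv2, ?_⟩
    intro pc' hpc' hx' hr' y hy
    rw [List.foldl_cons]
    rcases List.mem_cons.1 hpc' with rfl | hpc'
    · exact hmono y (hC hx' hr' y hy)
    · exact cl2 pc' hpc' hx' hr' y hy

theorem pvMain (h : List (String × List String))
    (hnc : ∀ q, ¬ pvAnc h q q) :
    ∀ f, pvMainProp h f := by
  intro f
  induction f with
  | zero =>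
    -- fuel 0 is unreachable: the DFS stack is a strict-ancestor chain of distinct keys
    intro x st vis hstanc hstp hstk hfuel _
    exfalso
    have hpw : (x :: st).Pairwise (fun a b => pvAnc h b a) :=
      List.pairwise_cons.2 ⟨hstanc, hstp⟩
    have hnd : (x :: st).Nodup :=
      hpw.imp (fun hab => by rintro rfl; exact hnc _ hab)
    have hnddl : (x :: st).dropLast.Nodup := (List.dropLast_sublist _).nodup hnd
    have hlen := pvLength_le_of_nodup_subset hnddl hstk
    rw [List.length_dropLast, List.length_map] at hlen
    simp only [List.length_cons] at hfuel hlen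
    omega
  | succ f ihf =>
    intro x st vis hstanc hstp hstk hfuel hinv
    have hlem := pvInnerLem h hnc f x st hstanc hstp hstk hfuel ihf h
      (fun _ hq => hq) vis []
      (by rw [PySem.Set.update_nil]; exact hinv)
    rw [PySem.Set.update_nil] at hlem
    obtain ⟨e, inv, cl⟩ := hlem
    rw [pvVisitB_items, pvInnerA_succ]
    refine ⟨e, by rw [e]; exact inv, ?_⟩
    intro y hy
    rw [e]
    rcases pvAnc_inv hy with hp | ⟨p, hp, hpy⟩
    · rcases pvMem_parentsNR.1 hp with ⟨cs, hm, hx, hr⟩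
      exact cl (y, cs) hm hx hr y (Or.inl rfl)
    · rcases pvMem_parentsNR.1 hp with ⟨cs, hm, hx, hr⟩
      exact cl (p, cs) hm hx hr y (Or.inr hpy)

-- ===== VERDICT (by name: the statement is the Claim_ definition above) =====
theorem get_ancestor_path_spec : Claim_equal_get_ancestor_path := by
  intro label hierarchy _dom hpre
  unfold Spec_get_ancestor_path
  rcases hpre with ⟨-, hb⟩
  have hnc := pvNoCycle hb
  have hm := pvMain hierarchy hnc (hierarchy.length + 1) label [] []
    (by simp) (by simp) (by simp) (by simp) (by intro q hq; simp at hq)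
  unfold get_ancestor_path get_ancestor_path_alt
  rw [hm.1]
  have h2 : PySem.Set.update ([] : List String) (pvInnerA hierarchy (hierarchy.length + 1) label)
      = pvInnerA hierarchy (hierarchy.length + 1) label := by
    rw [PySem.Set.update_nil_left]
    exact PySem.Set.ofList_eq_self_of_nodup _ pvInnerA_nodup
  rw [h2]
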